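-- pv_equiv track=rewrite | github.com/ai-cooperation/insurance-kb-v2 | scripts/rewrite-shallow-wiki.py | _find_relevant
-- ===== SOURCE A (Python) =====
-- def _find_relevant(titles, summaries, keywords):
--     """Find titles/summaries containing any of the keywords."""
--     results = []
--     for i, t in enumerate(titles):
--         for kw in keywords:
--             if kw in t or (i < len(summaries) and kw in summaries[i]):
--                 results.append((t, summaries[i] if i < len(summaries) else ""))
--                 break
--     return results
-- ===== SOURCE B (Python) =====
-- def _find_relevant(titles, summaries, keywords):
--     """Find titles/summaries containing any of the keywords.
--
--     Keyword-major restructuring: iterate keywords in the outer loop, mark the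
--     indices of hit titles in a set, then emit the marked titles in order.
--     """
--     matched = set()
--     for kw in keywords:
--         for i, t in enumerate(titles):
--             if i not in matched and (kw in t or (i < len(summaries) and kw in summaries[i])):
--                 matched.add(i)
--     return [(t, summaries[i] if i < len(summaries) else "")
--             for i, t in enumerate(titles) if i in matched]
-- ===== Notes on version B (the rewrite author's own statement) =====
-- stated objective: alternative
-- what changed: A scans title-major with an inner break on the first matching keyword; B inverts the loops (keyword-major), marks hit title indices in a set, and emits the marked titles in a final ordered pass.
import Mathlib
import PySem

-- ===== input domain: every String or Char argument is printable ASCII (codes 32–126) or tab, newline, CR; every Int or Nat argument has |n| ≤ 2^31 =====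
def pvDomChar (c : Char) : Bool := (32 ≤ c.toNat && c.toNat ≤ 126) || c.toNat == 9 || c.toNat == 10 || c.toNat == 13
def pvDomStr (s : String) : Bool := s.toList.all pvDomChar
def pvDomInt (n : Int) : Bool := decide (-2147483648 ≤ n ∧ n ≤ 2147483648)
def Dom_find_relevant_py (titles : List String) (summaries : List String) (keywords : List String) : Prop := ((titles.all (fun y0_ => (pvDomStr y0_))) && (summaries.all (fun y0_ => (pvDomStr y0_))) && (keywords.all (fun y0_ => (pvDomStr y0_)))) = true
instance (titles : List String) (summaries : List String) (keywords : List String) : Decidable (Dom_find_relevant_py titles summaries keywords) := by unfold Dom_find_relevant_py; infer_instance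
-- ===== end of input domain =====

-- B restructures A (alternative, not faster): keywords in the outer loop marking hit
-- title indices in a set, then one ordered pass emits the marked titles.
-- ===== PORT A =====
-- Inner 'for kw in keywords: if …: append; break' loop of A, as structural recursion.
def pvAInner (summaries : List String) (results : List (String × String)) (i : Int) (t : String) : List String → List (String × String)
  | [] => results
  | kw :: rest =>
    if PySem.Str.isIn kw t || (decide (i < (summaries.length : Int)) && PySem.Str.isIn kw (PySem.List.pyGetD summaries i "")) then
      results ++ [(t, if i < (summaries.length : Int) then PySem.List.pyGetD summaries i "" else "")]
    else pvAInner summaries results i t rest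

def find_relevant_py (titles : List String) (summaries : List String) (keywords : List String) : List (String × String) :=
  (PySem.List.enumerate titles 0).foldl (fun results p => pvAInner summaries results p.1 p.2 keywords) []

-- ===== PORT B =====
-- 'kw in t or (i < len(summaries) and kw in summaries[i])' for an enumerate pair p = (i, t)
def pvBHit (summaries : List String) (kw : String) (p : Int × String) : Bool :=
  PySem.Str.isIn kw p.2 || (decide (p.1 < (summaries.length : Int)) && PySem.Str.isIn kw (PySem.List.pyGetD summaries p.1 ""))

-- inner 'for i, t in enumerate(titles): if i not in matched and hit: matched.add(i)'
def pvBMark (summaries : List String) (kw : String) (pairs : List (Int × String)) (m : PySem.Set Int) : PySem.Set Int :=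
  pairs.foldl (fun m p => if PySem.Set.contains m p.1 then m else if pvBHit summaries kw p then PySem.Set.add m p.1 else m) m

def find_relevant_py_alt (titles : List String) (summaries : List String) (keywords : List String) : List (String × String) :=
  let pairs := PySem.List.enumerate titles 0
  let matched := keywords.foldl (fun m kw => pvBMark summaries kw pairs m) PySem.Set.empty
  (pairs.filter (fun p => PySem.Set.contains matched p.1)).map
    (fun p => (p.2, if p.1 < (summaries.length : Int) then PySem.List.pyGetD summaries p.1 "" else ""))

-- ===== PRECONDITION & SPEC =====
def Spec_find_relevant_py (titles : List String) (summaries : List String) (keywords : List String) (out : List (String × String)) : Prop := out = find_relevant_py_alt titles summaries keywords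
instance (titles : List String) (summaries : List String) (keywords : List String) (out : List (String × String)) : Decidable (Spec_find_relevant_py titles summaries keywords out) := by unfold Spec_find_relevant_py; infer_instance

-- ===== CLAIM (what is proved, stated in full; the proofs are below) =====
def Claim_equal_find_relevant_py : Prop := ∀ (titles : List String) (summaries : List String) (keywords : List String), Dom_find_relevant_py titles summaries keywords → Spec_find_relevant_py titles summaries keywords (find_relevant_py titles summaries keywords)

-- ===== LEMMAS AND PROOFS =====

-- ===== VERDICT (by name: the statement is the Claim_ definition above) =====

-- A's per-title inner loop returns 'append once' iff some keyword hits.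
theorem pvAInner_eq (summaries : List String) (results : List (String × String)) (i : Int) (t : String) (kws : List String) :
    pvAInner summaries results i t kws =
      if kws.any (fun kw => pvBHit summaries kw (i, t)) then
        results ++ [(t, if i < (summaries.length : Int) then PySem.List.pyGetD summaries i "" else "")]
      else results := by
  induction kws with
  | nil => simp [pvAInner]
  | cons kw rest ih =>
    simp only [pvAInner, List.any_cons, ih]
    by_cases h : (PySem.Str.isIn kw t || (decide (i < (summaries.length : Int)) && PySem.Str.isIn kw (PySem.List.pyGetD summaries i ""))) = true
    · have h1 : pvBHit summaries kw (i, t) = true := h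
      rw [if_pos h]; simp [h1]
    · have h0 : pvBHit summaries kw (i, t) = false := eq_false_of_ne_true h
      rw [if_neg h]; simp [h0]

-- membership after B's inner marking pass
theorem pvBMark_mem (summaries : List String) (kw : String) (pairs : List (Int × String)) (m : PySem.Set Int) (j : Int) :
    (j ∈ pvBMark summaries kw pairs m) ↔ j ∈ m ∨ ∃ p ∈ pairs, p.1 = j ∧ pvBHit summaries kw p = true := by
  induction pairs generalizing m with
  | nil => simp [pvBMark]
  | cons p rest ih =>
    simp only [pvBMark, List.foldl_cons] at *
    by_cases hc : PySem.Set.contains m p.1 = true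
    · rw [hc]
      rw [ih]
      constructor
      · rintro (hm | hrest)
        · exact Or.inl hm
        · exact Or.inr (by obtain ⟨q, hq, h1, h2⟩ := hrest; exact ⟨q, List.mem_cons_of_mem _ hq, h1, h2⟩)
      · rintro (hm | ⟨q, hq, h1, h2⟩)
        · exact Or.inl hm
        · rcases List.mem_cons.mp hq with rfl | hq'
          · exact Or.inl (h1 ▸ (PySem.Set.contains_iff m q.1).mp hc)
          · exact Or.inr ⟨q, hq', h1, h2⟩
    · rw [eq_false_of_ne_true hc]
      simp only [Bool.false_eq_true, if_false]
      by_cases hh : pvBHit summaries kw p = true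
      · rw [if_pos hh, ih]
        simp only [PySem.Set.mem_add]
        constructor
        · rintro (hm | hrest)
          · rcases hm with hm | hm
            · exact Or.inl hm
            · exact Or.inr ⟨p, List.mem_cons_self .., hm.symm, hh⟩
          · obtain ⟨q, hq, h1, h2⟩ := hrest; exact Or.inr ⟨q, List.mem_cons_of_mem _ hq, h1, h2⟩
        · rintro (hm | ⟨q, hq, h1, h2⟩)
          · exact Or.inl (Or.inl hm)
          · rcases List.mem_cons.mp hq with rfl | hq'
            · exact Or.inl (Or.inr h1.symm)
            · exact Or.inr ⟨q, hq', h1, h2⟩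
      · rw [if_neg hh, ih]
        constructor
        · rintro (hm | ⟨q, hq, h1, h2⟩)
          · exact Or.inl hm
          · exact Or.inr ⟨q, List.mem_cons_of_mem _ hq, h1, h2⟩
        · rintro (hm | ⟨q, hq, h1, h2⟩)
          · exact Or.inl hm
          · rcases List.mem_cons.mp hq with rfl | hq'
            · exact absurd h2 hh
            · exact Or.inr ⟨q, hq', h1, h2⟩

-- membership after B's outer keyword loop
theorem pvBFold_mem (summaries : List String) (pairs : List (Int × String)) (kws : List String) (m : PySem.Set Int) (j : Int) :
    (j ∈ kws.foldl (fun m kw => pvBMark summaries kw pairs m) m) ↔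
      j ∈ m ∨ ∃ kw ∈ kws, ∃ p ∈ pairs, p.1 = j ∧ pvBHit summaries kw p = true := by
  induction kws generalizing m with
  | nil => simp
  | cons kw rest ih =>
    simp only [List.foldl_cons, ih, pvBMark_mem]
    constructor
    · rintro ((hm | hp) | ⟨k, hk, hp⟩)
      · exact Or.inl hm
      · exact Or.inr ⟨kw, List.mem_cons_self .., hp⟩
      · exact Or.inr ⟨k, List.mem_cons_of_mem _ hk, hp⟩
    · rintro (hm | ⟨k, hk, hp⟩)
      · exact Or.inl (Or.inl hm)
      · rcases List.mem_cons.mp hk with rfl | hk'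
        · exact Or.inl (Or.inr hp)
        · exact Or.inr ⟨k, hk', hp⟩

-- two enumerate pairs with equal index are equal
theorem pv_eq_of_fst_eq {l : List (Int × String)} (h : l.Pairwise (fun p q => p.1 < q.1))
    {p q : Int × String} (hp : p ∈ l) (hq : q ∈ l) (hfst : p.1 = q.1) : p = q := by
  induction l with
  | nil => cases hp
  | cons a rest ih =>
    rcases List.pairwise_cons.mp h with ⟨ha, hrest⟩
    rcases List.mem_cons.mp hp with rfl | hp' <;> rcases List.mem_cons.mp hq with rfl | hq'
    · rfl
    · exact absurd hfst (by have := ha q hq'; omega)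
    · exact absurd hfst (by have := ha p hp'; omega)
    · exact ih hrest hp' hq'

-- ===== VERDICT (by name: the statement is the Claim_ definition above) =====
theorem find_relevant_py_spec : Claim_equal_find_relevant_py := by
  intro titles summaries keywords _
  unfold Spec_find_relevant_py find_relevant_py find_relevant_py_alt
  have hA : (PySem.List.enumerate titles 0).foldl (fun results p => pvAInner summaries results p.1 p.2 keywords) []
      = ([] : List (String × String)) ++ ((PySem.List.enumerate titles 0).filter (fun p => keywords.any (fun kw => pvBHit summaries kw p))).map
          (fun p => (p.2, if p.1 < (summaries.length : Int) then PySem.List.pyGetD summaries p.1 "" else "")) := by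
    rw [PySem.List.foldl_congr_mem (PySem.List.enumerate titles 0)
        (fun results p => pvAInner summaries results p.1 p.2 keywords)
        (fun acc (p : Int × String) =>
          if keywords.any (fun kw => pvBHit summaries kw p) then
            acc ++ [(p.2, if p.1 < (summaries.length : Int) then PySem.List.pyGetD summaries p.1 "" else "")]
          else acc)
        []
        (fun acc p _ => pvAInner_eq summaries acc p.1 p.2 keywords)]
    apply PySem.List.foldl_append_if
  rw [hA]
  simp only [List.nil_append]
  congr 1
  apply List.filter_congr
  intro p hp
  have hiff : (keywords.any (fun kw => pvBHit summaries kw p)) = true ↔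
      PySem.Set.contains (keywords.foldl (fun m kw => pvBMark summaries kw (PySem.List.enumerate titles 0) m) PySem.Set.empty) p.1 = true := by
    rw [PySem.Set.contains_iff, pvBFold_mem]
    constructor
    · intro h
      rcases List.any_eq_true.mp h with ⟨kw, hkw, hhit⟩
      exact Or.inr ⟨kw, hkw, p, hp, rfl, hhit⟩
    · rintro (hm | ⟨kw, hkw, q, hq, h1, h2⟩)
      · simp [PySem.Set.empty] at hm
      · have hqp : q = p := pv_eq_of_fst_eq (PySem.List.pairwise_lt_enumerate titles 0) hq hp h1
        exact List.any_eq_true.mpr ⟨kw, hkw, hqp ▸ h2⟩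
  cases ha : keywords.any (fun kw => pvBHit summaries kw p) with
  | true => exact (hiff.mp ha).symm
  | false =>
    cases hc : PySem.Set.contains (keywords.foldl (fun m kw => pvBMark summaries kw (PySem.List.enumerate titles 0) m) PySem.Set.empty) p.1 with
    | false => rfl
    | true => exact absurd (hiff.mpr hc) (by simp [ha])
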